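-- pv_equiv track=rewrite | github.com/OpenNumismat/open-numismat | src/EditCoinDialog/Auctions/AuctionParser.py | _stringToGrade
-- ===== SOURCE A (Python) =====
-- def _stringToGrade(string):
--     # Parse VF-XF and XF/AU
--     grade = ''
--     for c in string:
--         if c in '-+/':
--             break
--         else:
--             grade = grade + c
--
--     return grade
-- ===== SOURCE B (Python) =====
-- def _stringToGrade(string):
--     # Locate the earliest delimiter among '-', '+', '/' (treating "absent" as
--     # end-of-string), then slice off the prefix in one go.
--     cut = len(string)
--     for d in '-+/':
--         f = string.find(d)
--         if f != -1 and f < cut: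
--             cut = f
--     return string[:cut]
-- ===== Notes on version B (the rewrite author's own statement) =====
-- stated objective: faster
-- what changed: Replaces A's char-by-char accumulation with break by a locate-then-slice decomposition: take the minimum of str.find over the three delimiters, then slice the prefix once.
import Mathlib
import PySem

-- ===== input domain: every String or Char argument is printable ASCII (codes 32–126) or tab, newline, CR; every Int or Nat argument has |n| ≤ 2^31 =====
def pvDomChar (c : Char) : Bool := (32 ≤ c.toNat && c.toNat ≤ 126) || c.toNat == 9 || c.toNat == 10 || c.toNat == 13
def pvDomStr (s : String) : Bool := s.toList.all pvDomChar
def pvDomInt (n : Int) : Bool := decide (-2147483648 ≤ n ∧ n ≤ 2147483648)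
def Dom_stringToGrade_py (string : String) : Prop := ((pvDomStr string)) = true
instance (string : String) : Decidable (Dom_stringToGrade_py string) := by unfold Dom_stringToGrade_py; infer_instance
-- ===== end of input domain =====

-- B replaces A's char-by-char accumulation (with break) by locate-then-slice:
-- the minimum of str.find over the three delimiters gives the cut, then one slice.

-- ===== PORT A =====
-- the for-loop with break: grade accumulates chars until a delimiter is seen
def pvGradeLoopA : List Char → List Char → List Char
  | [], grade => grade
  | c :: rest, grade =>
      if PySem.Chars.isIn [c] ("-+/".toList) then grade
      else pvGradeLoopA rest (grade ++ [c])

def stringToGrade_py (string : String) : String :=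
  String.ofList (pvGradeLoopA string.toList [])

-- ===== PORT B =====
def stringToGrade_py_alt (string : String) : String :=
  let cut := ("-+/".toList).foldl
    (fun cut d =>
      let f := PySem.Chars.find string.toList [d]
      if f ≠ -1 ∧ f < cut then f else cut)
    (PySem.Str.len string)
  PySem.Str.slice string none (some cut)

-- ===== PRECONDITION & SPEC =====
def Spec_stringToGrade_py (string : String) (out : String) : Prop := out = stringToGrade_py_alt string
instance (string : String) (out : String) : Decidable (Spec_stringToGrade_py string out) := by unfold Spec_stringToGrade_py; infer_instance

-- ===== CLAIM (what is proved, stated in full; the proofs are below) =====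
def Claim_equal_stringToGrade_py : Prop := ∀ (string : String), Dom_stringToGrade_py string → Spec_stringToGrade_py string (stringToGrade_py string)

-- ===== LEMMAS AND PROOFS =====

-- a singleton is a prefix exactly when it is the head
lemma pv_singleton_prefix (d : Char) (l : List Char) : [d] <+: l ↔ l.head? = some d := by
  constructor
  · rintro ⟨t, rfl⟩; rfl
  · intro h
    cases l with
    | nil => simp at h
    | cons a t => simp at h; subst h; exact ⟨t, rfl⟩

-- Chars.find for a single character is List.findIdx (or -1 when absent)
lemma pv_find_mem (cs : List Char) (d : Char) (h : d ∈ cs) :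
    PySem.Chars.find cs [d] = (cs.findIdx (· == d) : Int) := by
  have hnn : 0 ≤ PySem.Chars.find cs [d] := by
    rw [PySem.Chars.find_nonneg_iff, List.singleton_infix_iff]; exact h
  obtain ⟨hpre, hmin⟩ := PySem.Chars.find_spec (s := cs) (sub := [d]) hnn
  set t := (PySem.Chars.find cs [d]).toNat with ht
  rw [pv_singleton_prefix, List.head?_drop] at hpre
  have htlen : t < cs.length := by
    by_contra hle
    rw [List.getElem?_eq_none (by omega)] at hpre
    simp at hpre
  have hfi : cs.findIdx (· == d) < cs.length :=
    List.findIdx_lt_length_of_exists ⟨d, h, by simp⟩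
  have h1 : ¬ t < cs.findIdx (· == d) := by
    intro hlt
    have := List.not_of_lt_findIdx hlt
    rw [List.getElem?_eq_getElem htlen] at hpre
    have hd : cs[t] = d := Option.some_inj.mp hpre
    have hne : ¬ cs[t] = d := by simpa using this
    exact hne hd
  have h2 : ¬ cs.findIdx (· == d) < t := by
    intro hlt
    apply hmin _ hlt
    rw [pv_singleton_prefix, List.head?_drop, List.getElem?_eq_getElem hfi]
    have := List.findIdx_getElem (w := hfi) (p := (· == d)) (xs := cs)
    simp at this
    simp [this]
  have : t = cs.findIdx (· == d) := by omega
  omega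

lemma pv_find_not_mem (cs : List Char) (d : Char) (h : d ∉ cs) :
    PySem.Chars.find cs [d] = -1 := by
  rw [PySem.Chars.find_eq_neg_one_iff, List.singleton_infix_iff]; exact h

-- one step of B's min-fold
lemma pv_step (cs : List Char) (d : Char) (cut : Int) (h : cut ≤ (cs.length : Int)) :
    (if PySem.Chars.find cs [d] ≠ -1 ∧ PySem.Chars.find cs [d] < cut
     then PySem.Chars.find cs [d] else cut)
      = min cut (cs.findIdx (· == d) : Int) := by
  by_cases hm : d ∈ cs
  · rw [pv_find_mem cs d hm]
    have : (0:Int) ≤ (cs.findIdx (· == d) : Int) := by positivity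
    split_ifs with hc <;> omega
  · rw [pv_find_not_mem cs d hm]
    have : cs.findIdx (· == d) = cs.length := by
      rw [List.findIdx_eq_length]; intro x hx; simp; rintro rfl; exact hm hx
    split_ifs with hc <;> omega

-- findIdx of a disjunction is the min of the findIdx's
lemma pv_findIdx_or (p q : Char → Bool) (l : List Char) :
    l.findIdx (fun c => p c || q c) = min (l.findIdx p) (l.findIdx q) := by
  induction l with
  | nil => simp
  | cons a t ih =>
    simp only [List.findIdx_cons, ih]
    cases hp : p a <;> cases hq : q a <;>
      simp only [Bool.true_or, Bool.false_or, Bool.or_false, cond_true, cond_false] <;>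
      omega

-- A's accumulation is takeWhile
lemma pv_takeWhile_eq_take (p : Char → Bool) (l : List Char) :
    l.takeWhile (fun c => !p c) = l.take (l.findIdx p) := by
  induction l with
  | nil => simp
  | cons a t ih =>
    simp only [List.takeWhile, List.findIdx_cons]
    cases hp : p a
    · simp only [Bool.not_false, cond_false, List.take_succ_cons, ih]
    · simp only [Bool.not_true, cond_true, List.take_zero]

lemma pv_isIn_delim (c : Char) :
    PySem.Chars.isIn [c] ("-+/".toList) = (c == '-' || c == '+' || c == '/') := by
  have hl : "-+/".toList = ['-', '+', '/'] := by decide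
  rcases h : (c == '-' || c == '+' || c == '/') with _ | _
  · rw [PySem.Chars.isIn_eq_false_iff, List.singleton_infix_iff, hl]
    simp at h ⊢; tauto
  · rw [PySem.Chars.isIn_iff_infix, List.singleton_infix_iff, hl]
    simp at h ⊢; tauto

lemma pv_loopA (cs acc : List Char) :
    pvGradeLoopA cs acc = acc ++ cs.takeWhile (fun c => !(c == '-' || c == '+' || c == '/')) := by
  induction cs generalizing acc with
  | nil => simp [pvGradeLoopA]
  | cons c rest ih =>
    rw [pvGradeLoopA, pv_isIn_delim]
    cases h : (c == '-' || c == '+' || c == '/') with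
    | true => simp [List.takeWhile, h]
    | false => simp [List.takeWhile, h, ih]

-- ===== VERDICT (by name: the statement is the Claim_ definition above) =====
theorem stringToGrade_py_spec : Claim_equal_stringToGrade_py := by
  intro s _
  unfold Spec_stringToGrade_py stringToGrade_py stringToGrade_py_alt
  set cs := s.toList with hcs
  have hlen : PySem.Str.len s = (cs.length : Int) := by simp [pysem, hcs]
  -- evaluate B's fold over the three delimiters
  have hfold : ("-+/".toList).foldl
      (fun cut d =>
        let f := PySem.Chars.find s.toList [d]
        if f ≠ -1 ∧ f < cut then f else cut)
      (PySem.Str.len s)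
      = (cs.findIdx (fun c => c == '-' || c == '+' || c == '/') : Int) := by
    have hl : "-+/".toList = ['-', '+', '/'] := by decide
    rw [hl, hlen]
    have h1 := List.findIdx_le_length (p := (· == '-')) (xs := cs)
    have h2 := List.findIdx_le_length (p := (· == '+')) (xs := cs)
    have h3 := List.findIdx_le_length (p := (· == '/')) (xs := cs)
    simp only [List.foldl]
    rw [pv_step cs '-' _ (by omega),
        pv_step cs '+' _ (by omega),
        pv_step cs '/' _ (by omega)]
    rw [show (fun c => c == '-' || c == '+' || c == '/')
          = (fun c => ((· == '-') c || (· == '+') c) || (· == '/') c) by rfl,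
        pv_findIdx_or, pv_findIdx_or]
    omega
  rw [hfold]
  apply String.toList_inj.mp
  rw [pv_loopA, pv_takeWhile_eq_take]
  simp only [List.nil_append, PySem.Str.slice, PySem.Chars.slice,
    PySem.List.slice_to_natCast, String.toList_ofList]
  rfl
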